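-- pv_equiv track=rewrite | github.com/badugujashwanth-create/Cricket_chatbot_Backend | scripts/build_clean_dataset.py | choose_primary_wicket
-- ===== SOURCE A (Python) =====
-- from typing import Any
--
-- CREDITED_WICKET_KINDS = {
--     'bowled',
--     'caught',
--     'caught and bowled',
--     'lbw',
--     'stumped',
--     'hit wicket',
-- }
--
-- def s_text(value: Any) -> str:
--     return ' '.join(str(value or '').strip().split())
--
-- def get_value(mapping: dict[str, Any] | None, key: str, default: Any = None) -> Any:
--     if not isinstance(mapping, dict):
--         return default
--     return mapping.get(key, default)
--
-- def choose_primary_wicket(wickets: list[dict[str, Any]]) -> dict[str, Any] | None: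
--     if not wickets:
--         return None
--     for wicket in wickets:
--         kind = s_text(get_value(wicket, 'kind')).lower()
--         if kind in CREDITED_WICKET_KINDS and s_text(get_value(wicket, 'player_out')):
--             return wicket
--     for wicket in wickets:
--         if s_text(get_value(wicket, 'player_out')):
--             return wicket
--     return wickets[0]
-- ===== SOURCE B (Python) =====
-- from typing import Any
--
-- CREDITED_WICKET_KINDS = {
--     'bowled',
--     'caught',
--     'caught and bowled',
--     'lbw',
--     'stumped',
--     'hit wicket',
-- }
--
-- def s_text(value: Any) -> str:
--     return ' '.join(str(value or '').strip().split())
--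
-- def get_value(mapping: dict[str, Any] | None, key: str, default: Any = None) -> Any:
--     if not isinstance(mapping, dict):
--         return default
--     return mapping.get(key, default)
--
-- def choose_primary_wicket(wickets: list[dict[str, Any]]) -> dict[str, Any] | None:
--     if not wickets:
--         return None
--     fallback = None
--     for wicket in wickets:
--         if s_text(get_value(wicket, 'player_out')):
--             kind = s_text(get_value(wicket, 'kind')).lower()
--             if kind in CREDITED_WICKET_KINDS:
--                 return wicket
--             if fallback is None:
--                 fallback = wicket
--     return fallback if fallback is not None else wickets[0]
-- ===== Notes on version B (the rewrite author's own statement) =====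
-- stated objective: simpler
-- what changed: Replaces A's two sequential scans over the wicket list with a single pass that returns immediately on a credited wicket with a player out and remembers the first wicket with a player out as a fallback.
import Mathlib
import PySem

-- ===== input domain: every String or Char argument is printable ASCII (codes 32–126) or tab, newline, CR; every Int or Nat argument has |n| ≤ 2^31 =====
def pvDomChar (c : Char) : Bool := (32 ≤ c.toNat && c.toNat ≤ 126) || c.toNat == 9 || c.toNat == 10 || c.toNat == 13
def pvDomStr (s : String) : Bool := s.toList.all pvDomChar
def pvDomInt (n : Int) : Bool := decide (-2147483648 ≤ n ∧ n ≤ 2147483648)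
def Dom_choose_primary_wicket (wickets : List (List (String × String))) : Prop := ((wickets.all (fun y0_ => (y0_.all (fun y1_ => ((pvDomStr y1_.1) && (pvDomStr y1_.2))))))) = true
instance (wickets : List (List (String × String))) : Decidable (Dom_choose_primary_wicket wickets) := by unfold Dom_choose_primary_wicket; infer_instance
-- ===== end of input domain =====

-- B replaces A's two sequential scans with one pass that keeps the first player_out wicket as a fallback (simpler, single traversal).


-- ===== PORT A =====
-- shared module-level helpers (used verbatim by both Pythons)
def pvCreditedKinds : List String :=
  ["bowled", "caught", "caught and bowled", "lbw", "stumped", "hit wicket"]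

-- s_text(value) = ' '.join(str(value or '').strip().split()); value is a string or missing-key None (→ '')
def pvSText (s : String) : String :=
  PySem.Str.join " " (PySem.Str.split₀ (PySem.Str.strip s))

-- get_value(wicket, key): dict lookup = first match in the association list; missing → None (default)
def pvGetVal (w : List (String × String)) (k : String) : Option String :=
  (w.find? (fun p => p.1 == k)).map (·.2)

-- kind = s_text(get_value(wicket, 'kind')).lower()
def pvKind (w : List (String × String)) : String :=
  PySem.Str.lower (pvSText ((pvGetVal w "kind").getD ""))

-- truthiness of s_text(get_value(wicket, 'player_out'))
def pvHasOut (w : List (String × String)) : Bool :=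
  pvSText ((pvGetVal w "player_out").getD "") != ""

def choose_primary_wicket (wickets : List (List (String × String))) : Option (List (String × String)) :=
  match wickets with
  | [] => none                                   -- if not wickets: return None
  | _ =>
    -- first for-loop: first credited wicket with a player out
    match wickets.find? (fun w => pvCreditedKinds.contains (pvKind w) && pvHasOut w) with
    | some w => some w
    | none =>
      -- second for-loop: first wicket with a player out
      match wickets.find? (fun w => pvHasOut w) with
      | some w => some w
      | none => PySem.List.pyGet? wickets 0      -- return wickets[0]

-- ===== PORT B =====
-- single pass with a fallback accumulator, following Source B line by line
def pvAltLoop (ws : List (List (String × String))) (fallback : Option (List (String × String))) :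
    Option (List (String × String)) :=
  match ws with
  | [] => fallback
  | w :: rest =>
    if pvHasOut w then
      if pvCreditedKinds.contains (pvKind w) then some w
      else pvAltLoop rest (if fallback.isNone then some w else fallback)
    else pvAltLoop rest fallback

def choose_primary_wicket_alt (wickets : List (List (String × String))) : Option (List (String × String)) :=
  match wickets with
  | [] => none
  | w0 :: _ =>
    match pvAltLoop wickets none with
    | some w => some w
    | none => some w0                            -- fallback is None: return wickets[0]

-- ===== PRECONDITION & SPEC =====
def Spec_choose_primary_wicket (wickets : List (List (String × String))) (out : Option (List (String × String))) : Prop := out = choose_primary_wicket_alt wickets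
instance (wickets : List (List (String × String))) (out : Option (List (String × String))) : Decidable (Spec_choose_primary_wicket wickets out) := by unfold Spec_choose_primary_wicket; infer_instance

-- ===== CLAIM (what is proved, stated in full; the proofs are below) =====
def Claim_equal_choose_primary_wicket : Prop := ∀ (wickets : List (List (String × String))), Dom_choose_primary_wicket wickets → Spec_choose_primary_wicket wickets (choose_primary_wicket wickets)

-- ===== LEMMAS AND PROOFS =====
-- The one-pass loop equals: first credited hit, else fallback, else first player_out hit.
theorem pvAltLoop_eq (ws : List (List (String × String))) (fb : Option (List (String × String))) :
    pvAltLoop ws fb =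
      match ws.find? (fun w => pvCreditedKinds.contains (pvKind w) && pvHasOut w) with
      | some w => some w
      | none => fb.orElse (fun _ => ws.find? (fun w => pvHasOut w)) := by
  induction ws generalizing fb with
  | nil => cases fb <;> simp [pvAltLoop, Option.orElse]
  | cons w rest ih =>
    by_cases hOut : pvHasOut w
    · by_cases hCr : pvKind w ∈ pvCreditedKinds
      · simp [pvAltLoop, hOut, hCr, List.find?]
      · cases fb <;>
          simp [pvAltLoop, hOut, hCr, List.find?, ih, Option.orElse]
    · simp only [pvAltLoop, hOut, Bool.false_eq_true, if_false, ih, List.find?]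
      cases rest.find? (fun w => pvCreditedKinds.contains (pvKind w) && pvHasOut w) <;>
        cases fb <;> simp [Option.orElse]

-- ===== VERDICT (by name: the statement is the Claim_ definition above) =====
theorem choose_primary_wicket_spec : Claim_equal_choose_primary_wicket := by
  intro wickets _
  unfold Spec_choose_primary_wicket
  cases wickets with
  | nil => rfl
  | cons w0 rest =>
    simp only [choose_primary_wicket, choose_primary_wicket_alt, pvAltLoop_eq]
    cases hp : (w0 :: rest).find? (fun w => pvCreditedKinds.contains (pvKind w) && pvHasOut w) with
    | some w => simp [Option.orElse]
    | none =>
      cases hq : (w0 :: rest).find? (fun w => pvHasOut w) with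
      | some w => simp
      | none => simp [Option.orElse, PySem.List.pyGet?, PySem.List.pyIdx?]
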